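-- pv_equiv track=rewrite | github.com/Marcoskk7/KG-AMTL | tests/read_mat_B007_0.py | _find_time_key
-- ===== SOURCE A (Python) =====
-- def _find_time_key(d: dict, prefer: str = "DE") -> str | None:
--     """
--     在 .mat 字典中自动寻找时域信号对应的 key。
--
--     - 优先查找包含 'DE_time' 的键（驱动端 Drive End）
--     - 若未找到，再查找包含 'FE_time' 的键（风扇端 Fan End）
--     - 再不行，则兜底查找以 '_time' 结尾的键
--     """
--     prefer = prefer.upper()
--     keys = [k for k in d.keys() if not k.startswith("__")]
--
--     if prefer == "DE":
--         cand = [k for k in keys if "DE_time" in k]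
--         if cand:
--             return cand[0]
--         cand = [k for k in keys if "FE_time" in k]
--         if cand:
--             return cand[0]
--     elif prefer == "FE":
--         cand = [k for k in keys if "FE_time" in k]
--         if cand:
--             return cand[0]
--         cand = [k for k in keys if "DE_time" in k]
--         if cand:
--             return cand[0]
--
--     # 兜底：任何以 _time 结尾的键
--     cand = [k for k in keys if k.endswith("_time")]
--     return cand[0] if cand else None
-- ===== SOURCE B (Python) =====
-- def _find_time_key(d: dict, prefer: str = "DE") -> str | None:
--     """Single pass over keys, recording the first match in each category,
--     then applying the preference order afterwards."""
--     prefer = prefer.upper()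
--     first_de = first_fe = first_time = None
--     for k in d.keys():
--         if k.startswith("__"):
--             continue
--         if first_de is None and "DE_time" in k:
--             first_de = k
--         if first_fe is None and "FE_time" in k:
--             first_fe = k
--         if first_time is None and k.endswith("_time"):
--             first_time = k
--     if prefer == "DE":
--         if first_de is not None:
--             return first_de
--         if first_fe is not None:
--             return first_fe
--     elif prefer == "FE":
--         if first_fe is not None:
--             return first_fe
--         if first_de is not None:
--             return first_de
--     return first_time
-- ===== Notes on version B (the rewrite author's own statement) =====
-- stated objective: alternative
-- what changed: One pass over the keys building first-seen candidates for DE_time / FE_time / *_time, with the preference logic applied after the loop, instead of up to three sequential filtering scans of the key list.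
import Mathlib
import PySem

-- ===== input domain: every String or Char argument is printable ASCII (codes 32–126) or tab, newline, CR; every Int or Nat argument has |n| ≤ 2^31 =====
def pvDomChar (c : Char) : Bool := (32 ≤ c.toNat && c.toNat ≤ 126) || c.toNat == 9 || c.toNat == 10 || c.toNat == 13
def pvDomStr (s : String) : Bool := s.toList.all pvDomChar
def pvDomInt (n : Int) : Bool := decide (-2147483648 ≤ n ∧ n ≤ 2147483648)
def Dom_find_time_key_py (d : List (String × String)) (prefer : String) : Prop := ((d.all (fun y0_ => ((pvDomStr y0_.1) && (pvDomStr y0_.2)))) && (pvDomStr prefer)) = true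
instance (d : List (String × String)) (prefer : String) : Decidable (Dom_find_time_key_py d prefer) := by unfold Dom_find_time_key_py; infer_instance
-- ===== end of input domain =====

-- B makes ONE pass over the keys, recording first-seen candidates per category, then applies
-- the preference order afterwards, instead of A's up-to-three sequential filtering scans
-- (objective: alternative decomposition, same asymptotic cost).

-- ===== PORT A =====
def find_time_key_py (d : List (String × String)) (prefer : String) : Option String :=
  let pr := PySem.Str.upper prefer
  let keys := ((PySem.Dict.ofList d).keys).filter (fun k => !(PySem.Str.startswith k "__"))
  -- 兜底: any key ending with '_time' (the final 'cand[0] if cand else None' line)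
  let fallback := fun (_ : Unit) => (keys.filter (fun k => PySem.Str.endswith k "_time")).head?
  if pr = "DE" then
    match (keys.filter (fun k => PySem.Str.isIn "DE_time" k)).head? with
    | some k => some k
    | none =>
      match (keys.filter (fun k => PySem.Str.isIn "FE_time" k)).head? with
      | some k => some k
      | none => fallback ()
  else if pr = "FE" then
    match (keys.filter (fun k => PySem.Str.isIn "FE_time" k)).head? with
    | some k => some k
    | none =>
      match (keys.filter (fun k => PySem.Str.isIn "DE_time" k)).head? with
      | some k => some k
      | none => fallback ()
  else fallback ()

-- ===== PORT B =====
def find_time_key_py_alt (d : List (String × String)) (prefer : String) : Option String :=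
  let pr := PySem.Str.upper prefer
  -- one pass: (first_de, first_fe, first_time), each set only on first match
  let r := ((PySem.Dict.ofList d).keys).foldl
    (fun (acc : Option String × Option String × Option String) k =>
      if PySem.Str.startswith k "__" then acc
      else (if acc.1.isNone && PySem.Str.isIn "DE_time" k then some k else acc.1,
            if acc.2.1.isNone && PySem.Str.isIn "FE_time" k then some k else acc.2.1,
            if acc.2.2.isNone && PySem.Str.endswith k "_time" then some k else acc.2.2))
    (none, none, none)
  if pr = "DE" then
    match r.1 with
    | some k => some k
    | none => match r.2.1 with
      | some k => some k
      | none => r.2.2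
  else if pr = "FE" then
    match r.2.1 with
    | some k => some k
    | none => match r.1 with
      | some k => some k
      | none => r.2.2
  else r.2.2

-- ===== PRECONDITION & SPEC =====
def Spec_find_time_key_py (d : List (String × String)) (prefer : String) (out : Option String) : Prop := out = find_time_key_py_alt d prefer
instance (d : List (String × String)) (prefer : String) (out : Option String) : Decidable (Spec_find_time_key_py d prefer out) := by unfold Spec_find_time_key_py; infer_instance

-- ===== CLAIM (what is proved, stated in full; the proofs are below) =====
def Claim_equal_find_time_key_py : Prop := ∀ (d : List (String × String)) (prefer : String), Dom_find_time_key_py d prefer → Spec_find_time_key_py d prefer (find_time_key_py d prefer)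

-- ===== LEMMAS AND PROOFS =====

-- B's single pass computes the head of each of A's three filtered lists
-- (stated for abstract predicates q = skip, p1/p2/p3 = the three categories).
theorem pv_fold_first_seen (q p1 p2 p3 : String → Bool) (l : List String)
    (a b c : Option String) :
    l.foldl
      (fun (acc : Option String × Option String × Option String) k =>
        if q k then acc
        else (if acc.1.isNone && p1 k then some k else acc.1,
              if acc.2.1.isNone && p2 k then some k else acc.2.1,
              if acc.2.2.isNone && p3 k then some k else acc.2.2))
      (a, b, c)
    = (a.or (((l.filter (fun k => !q k)).filter p1).head?),
       b.or (((l.filter (fun k => !q k)).filter p2).head?),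
       c.or (((l.filter (fun k => !q k)).filter p3).head?)) := by
  induction l generalizing a b c with
  | nil => simp
  | cons h t ih =>
    simp only [List.foldl_cons, List.filter_cons]
    by_cases hq : q h
    · rw [if_pos hq, ih]; simp [hq]
    · rw [if_neg hq, ih]
      cases a <;> cases b <;> cases c <;>
        by_cases h1 : p1 h <;> by_cases h2 : p2 h <;> by_cases h3 : p3 h <;>
        simp [hq, h1, h2, h3]

-- ===== VERDICT (by name: the statement is the Claim_ definition above) =====
theorem find_time_key_py_spec : Claim_equal_find_time_key_py := by
  intro d prefer _
  unfold Spec_find_time_key_py find_time_key_py find_time_key_py_alt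
  rw [show (fun (acc : Option String × Option String × Option String) k =>
        if PySem.Str.startswith k "__" then acc
        else (if acc.1.isNone && PySem.Str.isIn "DE_time" k then some k else acc.1,
              if acc.2.1.isNone && PySem.Str.isIn "FE_time" k then some k else acc.2.1,
              if acc.2.2.isNone && PySem.Str.endswith k "_time" then some k else acc.2.2))
      = (fun (acc : Option String × Option String × Option String) k =>
        if (fun k => PySem.Str.startswith k "__") k then acc
        else (if acc.1.isNone && (fun k => PySem.Str.isIn "DE_time" k) k then some k else acc.1,
              if acc.2.1.isNone && (fun k => PySem.Str.isIn "FE_time" k) k then some k else acc.2.1,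
              if acc.2.2.isNone && (fun k => PySem.Str.endswith k "_time") k then some k else acc.2.2)) from rfl,
     pv_fold_first_seen]
  simp only [Option.none_or]
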